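-- pv_equiv track=rewrite | github.com/adityasinha1002/CareSyncVision | ai-server/engines/health_response_engine.py | _determine_overall_severity
-- ===== SOURCE A (Python) =====
-- from typing import Dict, List, Any
--
-- def _determine_overall_severity(alerts: List[Dict[str, Any]]) -> str:
--     """
--     Determine overall severity based on all alerts
--     """
--     if not alerts:
--         return 'normal'
--
--     severity_levels = [alert.get('severity', 'INFO') for alert in alerts]
--
--     if 'CRITICAL' in severity_levels:
--         return 'critical'
--     elif 'WARNING' in severity_levels:
--         return 'warning'
--     else:
--         return 'info'
-- ===== SOURCE B (Python) =====
-- def _determine_overall_severity(alerts):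
--     if not alerts:
--         return 'normal'
--     rank = {'CRITICAL': 3, 'WARNING': 2}
--     m = 1
--     for alert in alerts:
--         m = max(m, rank.get(alert.get('severity', 'INFO'), 1))
--     return {3: 'critical', 2: 'warning'}.get(m, 'info')
-- ===== Notes on version B (the rewrite author's own statement) =====
-- stated objective: alternative
-- what changed: Replaces the intermediate severity list plus two membership scans with a single pass maintaining a running maximum priority rank mapped back to a tier name.
import Mathlib
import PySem

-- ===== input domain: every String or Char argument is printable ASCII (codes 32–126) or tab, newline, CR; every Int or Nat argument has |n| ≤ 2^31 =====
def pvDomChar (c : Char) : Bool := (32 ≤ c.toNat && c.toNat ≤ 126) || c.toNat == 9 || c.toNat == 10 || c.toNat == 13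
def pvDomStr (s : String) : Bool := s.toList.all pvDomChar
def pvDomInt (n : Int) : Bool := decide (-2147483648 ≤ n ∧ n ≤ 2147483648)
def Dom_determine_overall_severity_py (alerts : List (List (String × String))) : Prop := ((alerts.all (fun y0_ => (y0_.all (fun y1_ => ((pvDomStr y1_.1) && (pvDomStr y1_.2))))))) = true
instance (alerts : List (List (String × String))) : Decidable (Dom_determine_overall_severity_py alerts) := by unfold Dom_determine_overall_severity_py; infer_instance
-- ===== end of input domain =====

-- ===== PORT A =====
-- A: collect the severity list, then membership checks for CRITICAL / WARNING.
def pvSev (alert : List (String × String)) : String :=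
  (PySem.Dict.ofList alert).getD "severity" "INFO"

def determine_overall_severity_py (alerts : List (List (String × String))) : String :=
  if alerts = [] then "normal"
  else
    let severity_levels := alerts.map pvSev
    if severity_levels.contains "CRITICAL" then "critical"
    else if severity_levels.contains "WARNING" then "warning"
    else "info"

-- ===== PORT B =====
-- B: one pass keeping a running maximum priority rank, mapped back to a tier name.
def pvRank (s : String) : Nat :=
  if s = "CRITICAL" then 3 else if s = "WARNING" then 2 else 1

def determine_overall_severity_py_alt (alerts : List (List (String × String))) : String :=
  if alerts = [] then "normal"
  else
    let m := alerts.foldl (fun r alert => max r (pvRank (pvSev alert))) 1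
    if m = 3 then "critical" else if m = 2 then "warning" else "info"

-- ===== PRECONDITION & SPEC =====
def Spec_determine_overall_severity_py (alerts : List (List (String × String))) (out : String) : Prop := out = determine_overall_severity_py_alt alerts
instance (alerts : List (List (String × String))) (out : String) : Decidable (Spec_determine_overall_severity_py alerts out) := by unfold Spec_determine_overall_severity_py; infer_instance

-- ===== CLAIM (what is proved, stated in full; the proofs are below) =====
def Claim_equal_determine_overall_severity_py : Prop := ∀ (alerts : List (List (String × String))), Dom_determine_overall_severity_py alerts → Spec_determine_overall_severity_py alerts (determine_overall_severity_py alerts)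

-- ===== LEMMAS AND PROOFS =====

def pvTier (L : List String) : Nat :=
  if "CRITICAL" ∈ L then 3 else if "WARNING" ∈ L then 2 else 1

theorem pvTier_cons (s : String) (L : List String) :
    pvTier (s :: L) = max (pvRank s) (pvTier L) := by
  unfold pvTier pvRank
  by_cases h1 : s = "CRITICAL" <;> by_cases h2 : s = "WARNING" <;>
    by_cases hC : "CRITICAL" ∈ L <;> by_cases hW : "WARNING" ∈ L <;>
      simp_all [List.mem_cons, eq_comm]

theorem pvTier_ge_one (L : List String) : 1 ≤ pvTier L := by
  unfold pvTier; split_ifs <;> omega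

theorem pvFold_eq_tier (alerts : List (List (String × String))) (c : Nat) (hc : 1 ≤ c) :
    alerts.foldl (fun r alert => max r (pvRank (pvSev alert))) c
      = max c (pvTier (alerts.map pvSev)) := by
  induction alerts generalizing c with
  | nil => simp [pvTier]; omega
  | cons x xs ih =>
    simp only [List.foldl_cons, List.map_cons]
    rw [ih (max c (pvRank (pvSev x))) (by unfold pvRank; split_ifs <;> omega),
        pvTier_cons]
    omega

-- ===== VERDICT (by name: the statement is the Claim_ definition above) =====
theorem determine_overall_severity_py_spec : Claim_equal_determine_overall_severity_py := by
  intro alerts _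
  unfold Spec_determine_overall_severity_py determine_overall_severity_py determine_overall_severity_py_alt
  by_cases hn : alerts = []
  · simp [hn]
  · simp only [hn, if_false]
    rw [pvFold_eq_tier alerts 1 (le_refl 1), Nat.max_eq_right (pvTier_ge_one _)]
    unfold pvTier
    simp only [List.mem_map]
    by_cases hC : ∃ a ∈ alerts, pvSev a = "CRITICAL" <;>
      by_cases hW : ∃ a ∈ alerts, pvSev a = "WARNING" <;>
        simp [hC, hW]
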